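-- pv_equiv track=rewrite | github.com/hikaru1214/Postchair | app/runtime_service.py | normalize_notification_label_ids
-- ===== SOURCE A (Python) =====
-- from typing import Any
--
-- LABEL_METADATA: dict[int, dict[str, Any]] = {
--     0: {"id": 0, "name": "離席", "severity": "neutral"},
--     1: {"id": 1, "name": "良い姿勢", "severity": "positive"},
--     2: {"id": 2, "name": "猫背", "severity": "warning"},
--     3: {"id": 3, "name": "前傾姿勢", "severity": "warning"},
--     4: {"id": 4, "name": "右足組み", "severity": "warning"},
--     5: {"id": 5, "name": "左足組み", "severity": "warning"},
-- }
--
-- def normalize_notification_label_ids(label_ids: list[int] | tuple[int, ...] | set[int]) -> list[int]: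
--     return sorted(
--         {
--             int(label_id)
--             for label_id in label_ids
--             if int(label_id) in LABEL_METADATA
--             and LABEL_METADATA[int(label_id)].get("severity") == "warning"
--         }
--     )
-- ===== SOURCE B (Python) =====
-- from typing import Any
--
-- LABEL_METADATA: dict[int, dict[str, Any]] = {
--     0: {"id": 0, "name": "離席", "severity": "neutral"},
--     1: {"id": 1, "name": "良い姿勢", "severity": "positive"},
--     2: {"id": 2, "name": "猫背", "severity": "warning"},
--     3: {"id": 3, "name": "前傾姿勢", "severity": "warning"},
--     4: {"id": 4, "name": "右足組み", "severity": "warning"},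
--     5: {"id": 5, "name": "左足組み", "severity": "warning"},
-- }
--
-- WARNING_IDS = sorted(k for k, v in LABEL_METADATA.items() if v.get("severity") == "warning")
--
-- def normalize_notification_label_ids(label_ids):
--     present = {int(label_id) for label_id in label_ids}
--     return [wid for wid in WARNING_IDS if wid in present]
-- ===== Notes on version B (the rewrite author's own statement) =====
-- stated objective: alternative
-- what changed: B precomputes the sorted warning-id domain once and filters that fixed list by membership in a set of the inputs, so the per-call sort of A disappears and the pass runs over the constant label domain instead of the input.
import Mathlib
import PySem

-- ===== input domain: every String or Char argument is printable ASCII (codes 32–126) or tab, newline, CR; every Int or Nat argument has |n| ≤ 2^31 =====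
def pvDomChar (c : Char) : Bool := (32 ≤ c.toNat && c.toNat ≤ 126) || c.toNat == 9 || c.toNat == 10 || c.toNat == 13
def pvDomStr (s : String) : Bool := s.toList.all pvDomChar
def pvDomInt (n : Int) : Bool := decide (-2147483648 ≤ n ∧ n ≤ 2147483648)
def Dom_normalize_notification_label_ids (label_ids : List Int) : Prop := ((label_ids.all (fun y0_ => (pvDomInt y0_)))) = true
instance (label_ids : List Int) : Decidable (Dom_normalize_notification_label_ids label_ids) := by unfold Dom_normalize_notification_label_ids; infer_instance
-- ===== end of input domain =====

-- B iterates the precomputed sorted warning-id domain and filters it by membership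
-- in a set of the inputs, instead of filtering the input and sorting per call.
-- ===== PORT A =====
structure Label where
  id : Int
  name : String
  severity : String
deriving DecidableEq, Repr

def LABEL_METADATA : PySem.Dict Int Label := PySem.Dict.ofList
  [(0, ⟨0, "離席", "neutral"⟩), (1, ⟨1, "良い姿勢", "positive"⟩),
   (2, ⟨2, "猫背", "warning"⟩), (3, ⟨3, "前傾姿勢", "warning"⟩),
   (4, ⟨4, "右足組み", "warning"⟩), (5, ⟨5, "左足組み", "warning"⟩)]

-- sorted({int(l) for l in label_ids if int(l) in LABEL_METADATA and LABEL_METADATA[int(l)].get("severity") == "warning"})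
def normalize_notification_label_ids (label_ids : List Int) : List Int :=
  PySem.List.sorted
    (PySem.Set.ofList (label_ids.filter (fun label_id =>
      LABEL_METADATA.contains label_id &&
        (match LABEL_METADATA.get? label_id with
         | some m => m.severity == "warning"
         | none => false))))
    (fun x => x) false

-- ===== PORT B =====
def WARNING_IDS : List Int :=
  PySem.List.sorted
    ((LABEL_METADATA.items.filter (fun kv => kv.2.severity == "warning")).map Prod.fst)
    (fun x => x) false

def normalize_notification_label_ids_alt (label_ids : List Int) : List Int :=
  let present := PySem.Set.ofList label_ids
  WARNING_IDS.filter (fun wid => PySem.Set.contains present wid)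

-- ===== PRECONDITION & SPEC =====
def Spec_normalize_notification_label_ids (label_ids : List Int) (out : List Int) : Prop := out = normalize_notification_label_ids_alt label_ids
instance (label_ids : List Int) (out : List Int) : Decidable (Spec_normalize_notification_label_ids label_ids out) := by unfold Spec_normalize_notification_label_ids; infer_instance

-- ===== CLAIM (what is proved, stated in full; the proofs are below) =====
def Claim_equal_normalize_notification_label_ids : Prop := ∀ (label_ids : List Int), Dom_normalize_notification_label_ids label_ids → Spec_normalize_notification_label_ids label_ids (normalize_notification_label_ids label_ids)

-- ===== LEMMAS AND PROOFS =====

lemma warning_ids_eval : WARNING_IDS = [2, 3, 4, 5] := by decide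

lemma condA_eq (l : Int) :
    (LABEL_METADATA.contains l &&
      (match LABEL_METADATA.get? l with
       | some m => m.severity == "warning"
       | none => false)) = decide (l = 2 ∨ l = 3 ∨ l = 4 ∨ l = 5) := by
  by_cases h0 : l = 0; · subst h0; decide
  by_cases h1 : l = 1; · subst h1; decide
  by_cases h2 : l = 2; · subst h2; decide
  by_cases h3 : l = 3; · subst h3; decide
  by_cases h4 : l = 4; · subst h4; decide
  by_cases h5 : l = 5; · subst h5; decide
  simp [LABEL_METADATA, PySem.Dict.ofList, PySem.Dict.update, PySem.Dict.insert,
    PySem.Dict.empty, PySem.Dict.get?, PySem.Dict.contains,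
    List.find?, h2, h3, h4, h5, Ne.symm h0, Ne.symm h1, Ne.symm h2,
    Ne.symm h3, Ne.symm h4, Ne.symm h5]


-- ===== VERDICT (by name: the statement is the Claim_ definition above) =====
theorem normalize_notification_label_ids_spec : Claim_equal_normalize_notification_label_ids := by
  intro label_ids _
  unfold Spec_normalize_notification_label_ids
  unfold normalize_notification_label_ids normalize_notification_label_ids_alt
  rw [warning_ids_eval]
  apply PySem.List.sorted_eq_of_perm_of_pairwise_lt
  · rw [List.perm_ext_iff_of_nodup
      (List.Nodup.filter _ (by decide)) (PySem.Set.nodup_ofList _)]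
    intro a
    simp only [List.mem_filter, PySem.Set.contains, List.contains, condA_eq,
      List.elem_eq_mem, decide_eq_true_eq, PySem.Set.mem_ofList]
    simp only [List.mem_cons, List.not_mem_nil, or_false]
    tauto
  · exact List.Pairwise.filter _ (by decide)
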